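-- pv_equiv track=rewrite | github.com/michiel-schepers/aoc2020 | day6/2.py | count_yes
-- ===== SOURCE A (Python) =====
-- def count_char(answer, char):
--     counter = 0
--     for i in answer:
--         if i is char:
--             counter += 1
--
--     return counter
--
-- def count_yes(group_answer):
--     unique = ""
--     one_answer = ""
--     length = len(group_answer)
--     for answer in group_answer:
--         one_answer += answer
--     for char in one_answer:
--         if count_char(one_answer, char) == length and char not in unique:
--             unique += char
--     return len(unique)
-- ===== SOURCE B (Python) =====
-- def count_yes(group_answer):
--     n = len(group_answer)
--     counts = {}
--     for ch in "".join(group_answer):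
--         counts[ch] = counts.get(ch, 0) + 1
--     total = 0
--     for v in counts.values():
--         if v == n:
--             total += 1
--     return total
-- ===== Notes on version B (the rewrite author's own statement) =====
-- stated objective: faster
-- what changed: Replaces A's per-character rescans (count_char over the whole concatenation for every occurrence) plus linear membership dedup with a single dict-counting pass followed by one scan over the counts.
import Mathlib
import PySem

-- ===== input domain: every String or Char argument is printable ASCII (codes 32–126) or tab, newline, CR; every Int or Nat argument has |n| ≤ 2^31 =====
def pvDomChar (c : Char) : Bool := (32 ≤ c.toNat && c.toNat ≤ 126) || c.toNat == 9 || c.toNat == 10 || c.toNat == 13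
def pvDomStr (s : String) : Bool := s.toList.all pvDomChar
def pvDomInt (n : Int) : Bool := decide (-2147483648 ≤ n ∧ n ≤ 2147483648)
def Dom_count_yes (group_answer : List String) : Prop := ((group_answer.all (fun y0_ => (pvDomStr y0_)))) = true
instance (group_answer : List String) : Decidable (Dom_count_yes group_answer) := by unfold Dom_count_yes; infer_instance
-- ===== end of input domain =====

-- B replaces A's quadratic rescan-and-dedup with a single hash-count pass (objective: faster, constant/asymptotic mechanism).

-- ===== PORT A =====
-- Python compares with `is` (identity); on the ASCII domain single-character strings are
-- interned by CPython, so identity coincides with `==` — ported as `==`, exact on Dom.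
def count_char (answer : List Char) (char : Char) : Int :=
  answer.foldl (fun counter i => if i == char then counter + 1 else counter) 0

def count_yes (group_answer : List String) : Int :=
  let length : Int := group_answer.length
  let one_answer : List Char :=
    group_answer.foldl (fun acc answer => acc ++ answer.toList) []
  let unique : List Char :=
    one_answer.foldl
      (fun unique char =>
        if count_char one_answer char == length && !(unique.contains char)
        then unique ++ [char] else unique) []
  (unique.length : Int)

-- ===== PORT B =====
def count_yes_alt (group_answer : List String) : Int :=
  let n : Int := group_answer.length
  let s : List Char := (PySem.Str.join "" group_answer).toList
  let counts : PySem.Dict Char Int :=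
    s.foldl (fun d ch => d.insert ch (d.getD ch 0 + 1)) PySem.Dict.empty
  counts.values.foldl (fun total v => if v == n then total + 1 else total) 0

-- ===== PRECONDITION & SPEC =====
def Spec_count_yes (group_answer : List String) (out : Int) : Prop := out = count_yes_alt group_answer
instance (group_answer : List String) (out : Int) : Decidable (Spec_count_yes group_answer out) := by unfold Spec_count_yes; infer_instance

-- ===== CLAIM (what is proved, stated in full; the proofs are below) =====
def Claim_equal_count_yes : Prop := ∀ (group_answer : List String), Dom_count_yes group_answer → Spec_count_yes group_answer (count_yes group_answer)

-- ===== LEMMAS AND PROOFS =====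

-- A's dedup-building loop: the accumulator stays Nodup and collects exactly the
-- chars of the traversed list satisfying P (plus what it started with).
theorem aLoop_mem (P : Char → Bool) (l : List Char) (u : List Char) (c : Char) :
    c ∈ l.foldl (fun u ch => if P ch && !(u.contains ch) then u ++ [ch] else u) u ↔
      c ∈ u ∨ (c ∈ l ∧ P c) := by
  induction l generalizing u with
  | nil => simp
  | cons x xs ih =>
    simp only [List.foldl_cons]
    by_cases hx : P x && !(u.contains x)
    · rw [if_pos hx, ih]
      simp only [Bool.and_eq_true, Bool.not_eq_true', List.contains_eq_mem,
        decide_eq_false_iff_not] at hx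
      simp only [List.mem_append, List.mem_cons, List.not_mem_nil, or_false]
      constructor
      · rintro ((h | rfl) | ⟨h1, h2⟩)
        · exact Or.inl h
        · exact Or.inr ⟨Or.inl rfl, hx.1⟩
        · exact Or.inr ⟨Or.inr h1, h2⟩
      · rintro (h | ⟨(rfl | h1), h2⟩)
        · exact Or.inl (Or.inl h)
        · exact Or.inl (Or.inr rfl)
        · exact Or.inr ⟨h1, h2⟩
    · rw [if_neg hx, ih]
      simp only [Bool.and_eq_true, Bool.not_eq_true', List.contains_eq_mem,
        decide_eq_false_iff_not, not_and, not_not] at hx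
      simp only [List.mem_cons]
      constructor
      · rintro (h | ⟨h1, h2⟩)
        · exact Or.inl h
        · exact Or.inr ⟨Or.inr h1, h2⟩
      · rintro (h | ⟨(rfl | h1), h2⟩)
        · exact Or.inl h
        · exact Or.inl (hx h2)
        · exact Or.inr ⟨h1, h2⟩

theorem aLoop_nodup (P : Char → Bool) (l : List Char) (u : List Char) (hu : u.Nodup) :
    (l.foldl (fun u ch => if P ch && !(u.contains ch) then u ++ [ch] else u) u).Nodup := by
  induction l generalizing u with
  | nil => exact hu
  | cons x xs ih =>
    simp only [List.foldl_cons]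
    by_cases hx : P x && !(u.contains x)
    · rw [if_pos hx]
      refine ih _ ?_
      simp only [Bool.and_eq_true, Bool.not_eq_true', List.contains_eq_mem,
        decide_eq_false_iff_not] at hx
      rw [List.nodup_append]
      exact ⟨hu, List.nodup_singleton x, fun a ha b hb => by rw [List.mem_singleton] at hb; subst hb; exact fun h => hx.2 (h ▸ ha)⟩
    · rw [if_neg hx]; exact ih _ hu

theorem intercalate_nil_chars (l : List (List Char)) : [].intercalate l = l.flatten := by
  induction l with
  | nil => rfl
  | cons x t ih =>
    cases t with
    | nil => simp [List.intercalate]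
    | cons y s =>
      simp only [List.intercalate, List.intersperse] at *
      simp_all

-- B's tallying loop over the counter's values is a countP of the predicate (count = n).
theorem bLoop_eq_countP (vs : List Int) (n : Int) :
    vs.foldl (fun total v => if v == n then total + 1 else total) 0 =
      ((vs.countP (fun v => v == n) : Nat) : Int) := by
  rw [PySem.List.foldl_beq_add_one, List.count_eq_countP]
  simp

-- ===== VERDICT (by name: the statement is the Claim_ definition above) =====
theorem count_yes_spec : Claim_equal_count_yes := by
  intro group_answer _
  unfold Spec_count_yes count_yes count_yes_alt
  dsimp only
  -- both concatenations are the flatten of the per-group char lists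
  have hflat : group_answer.foldl (fun acc answer => acc ++ answer.toList) [] =
      (group_answer.map String.toList).flatten := by
    rw [PySem.List.foldl_append_eq_flatMap]
    simp [List.flatMap_def]
  have hjoin : (PySem.Str.join "" group_answer).toList =
      (group_answer.map String.toList).flatten := by
    simp [pysem]
    exact intercalate_nil_chars _
  rw [hflat, hjoin, PySem.Dict.foldl_insert_getD_add_one_eq_counter, bLoop_eq_countP]
  set s : List Char := (group_answer.map String.toList).flatten with hs
  set n : Int := (group_answer.length : Int) with hn
  have hvals : (PySem.Dict.counter s).values =
      (PySem.Set.ofList s).map (fun k => ((s.count k : Nat) : Int)) := by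
    have h0 : (PySem.Dict.counter s).values = (PySem.Dict.counter s).items.map Prod.snd := rfl
    rw [h0, PySem.Dict.items_counter, List.map_map]
    rfl
  rw [hvals, List.countP_map]
  have hcc : ∀ c : Char, count_char s c = ((s.count c : Nat) : Int) := by
    intro c
    unfold count_char
    rw [PySem.List.foldl_beq_add_one]; simp
  have hBlist : List.countP ((fun v => v == n) ∘ fun k => ((s.count k : Nat) : Int))
      (PySem.Set.ofList s) =
      ((PySem.Set.ofList s).filter (fun k => ((s.count k : Nat) : Int) == n)).length := by
    rw [List.countP_eq_length_filter]; rfl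
  rw [hBlist]
  have hperm : (s.foldl (fun unique char =>
        if count_char s char == n && !(unique.contains char)
        then unique ++ [char] else unique) []).Perm
      ((PySem.Set.ofList s).filter (fun k => ((s.count k : Nat) : Int) == n)) := by
    rw [List.perm_ext_iff_of_nodup
      (aLoop_nodup (fun c => count_char s c == n) s [] List.nodup_nil)
      ((PySem.Set.nodup_ofList s).filter _)]
    intro c
    rw [aLoop_mem (fun c => count_char s c == n) s [] c, List.mem_filter, PySem.Set.mem_ofList]
    simp [hcc c]
  rw [hperm.length_eq]
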